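-- pv_equiv track=rewrite | github.com/KieranMcFarlane/panther_chat | apps/signal-noise-app/backend/question_pack_business_reasoner.py | _score_service_fit
-- ===== SOURCE A (Python) =====
-- from typing import Any, Dict, Iterable, List, Mapping, Sequence, Tuple, Union
--
-- SERVICE_WEIGHT = {
--     "MOBILE_APPS": 18,
--     "DIGITAL_TRANSFORMATION": 22,
--     "FAN_ENGAGEMENT": 18,
--     "ANALYTICS": 14,
--     "ECOMMERCE": 16,
--     "UI_UX_DESIGN": 10,
-- }
--
-- def _score_service_fit(metadata_items: Sequence[Mapping[str, Any]]) -> Tuple[int, List[str]]: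
--     score = 0
--     signals: List[str] = []
--     for metadata in metadata_items:
--         for service in metadata.get("yp_service_fit", []):
--             service_key = str(service).upper()
--             service_weight = SERVICE_WEIGHT.get(service_key, 0)
--             if service_weight:
--                 score += service_weight
--                 signals.append(service_key)
--     return score, sorted(dict.fromkeys(signals))
-- ===== SOURCE B (Python) =====
-- from typing import Any, List, Mapping, Sequence, Tuple
--
-- SERVICE_WEIGHT = {
--     "MOBILE_APPS": 18,
--     "DIGITAL_TRANSFORMATION": 22,
--     "FAN_ENGAGEMENT": 18,
--     "ANALYTICS": 14,
--     "ECOMMERCE": 16,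
--     "UI_UX_DESIGN": 10,
-- }
--
-- def _score_service_fit(metadata_items: Sequence[Mapping[str, Any]]) -> Tuple[int, List[str]]:
--     # One frequency table over all uppercased service occurrences, then one
--     # pass over the distinct keys: weight each key by its count.
--     counts = {}
--     for metadata in metadata_items:
--         for service in metadata.get("yp_service_fit", []):
--             key = str(service).upper()
--             counts[key] = counts.get(key, 0) + 1
--     score = sum(SERVICE_WEIGHT.get(key, 0) * count for key, count in counts.items())
--     signals = sorted(key for key in counts if SERVICE_WEIGHT.get(key, 0))
--     return score, signals
-- ===== Notes on version B (the rewrite author's own statement) =====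
-- stated objective: alternative
-- what changed: B replaces A's growing occurrence list plus end-of-function dedup with a frequency table built in one pass, then computes the score as sum of weight*count over distinct keys and the signals as the sorted distinct weighted keys.
import Mathlib
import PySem

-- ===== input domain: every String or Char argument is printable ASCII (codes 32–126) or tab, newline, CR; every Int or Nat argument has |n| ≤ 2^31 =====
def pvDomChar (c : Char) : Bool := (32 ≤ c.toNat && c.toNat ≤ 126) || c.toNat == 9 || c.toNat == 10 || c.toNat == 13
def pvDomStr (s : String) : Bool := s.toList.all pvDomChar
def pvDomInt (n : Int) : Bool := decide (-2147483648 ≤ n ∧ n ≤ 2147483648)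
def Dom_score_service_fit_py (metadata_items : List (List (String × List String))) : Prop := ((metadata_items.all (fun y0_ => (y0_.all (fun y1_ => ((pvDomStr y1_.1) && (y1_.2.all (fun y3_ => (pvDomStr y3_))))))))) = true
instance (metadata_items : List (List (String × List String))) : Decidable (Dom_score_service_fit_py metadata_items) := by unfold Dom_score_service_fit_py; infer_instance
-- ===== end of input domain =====

-- B keeps per-key counts instead of an occurrence list, then scores and sorts the distinct keys (alternative decomposition, same cost).

def SERVICE_WEIGHT : PySem.Dict String Int :=
  PySem.Dict.ofList [("MOBILE_APPS", 18), ("DIGITAL_TRANSFORMATION", 22),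
    ("FAN_ENGAGEMENT", 18), ("ANALYTICS", 14), ("ECOMMERCE", 16), ("UI_UX_DESIGN", 10)]

-- ===== PORT A =====
def score_service_fit_py (metadata_items : List (List (String × List String))) : Int × List String :=
  let res := metadata_items.foldl (fun st metadata =>
      ((PySem.Dict.mk metadata).getD "yp_service_fit" []).foldl (fun st service =>
        let service_key := PySem.Str.upper service
        let service_weight := SERVICE_WEIGHT.getD service_key 0
        if service_weight ≠ 0 then (st.1 + service_weight, st.2 ++ [service_key]) else st)
      st)
    ((0 : Int), ([] : List String))
  (res.1, PySem.List.sorted (PySem.List.dedup res.2) (fun x => x) false)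

-- ===== PORT B =====
def score_service_fit_py_alt (metadata_items : List (List (String × List String))) : Int × List String :=
  let counts := metadata_items.foldl (fun counts metadata =>
      ((PySem.Dict.mk metadata).getD "yp_service_fit" []).foldl (fun counts service =>
        let key := PySem.Str.upper service
        counts.insert key (counts.getD key 0 + 1))
      counts)
    (PySem.Dict.empty : PySem.Dict String Int)
  let score := counts.items.foldl (fun s kc => s + SERVICE_WEIGHT.getD kc.1 0 * kc.2) 0
  let signals := PySem.List.sorted ((counts.keys).filter (fun k => SERVICE_WEIGHT.getD k 0 ≠ 0)) (fun x => x) false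
  (score, signals)

-- ===== PRECONDITION & SPEC =====
def Spec_score_service_fit_py (metadata_items : List (List (String × List String))) (out : Int × List String) : Prop := out = score_service_fit_py_alt metadata_items
instance (metadata_items : List (List (String × List String))) (out : Int × List String) : Decidable (Spec_score_service_fit_py metadata_items out) := by unfold Spec_score_service_fit_py; infer_instance

-- ===== CLAIM (what is proved, stated in full; the proofs are below) =====
def Claim_equal_score_service_fit_py : Prop := ∀ (metadata_items : List (List (String × List String))), Dom_score_service_fit_py metadata_items → Spec_score_service_fit_py metadata_items (score_service_fit_py metadata_items)

-- ===== LEMMAS AND PROOFS =====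

-- the uppercased service occurrences, flattened in traversal order
def pvOccs (metadata_items : List (List (String × List String))) : List String :=
  metadata_items.flatMap (fun m => ((PySem.Dict.mk m).getD "yp_service_fit" []).map PySem.Str.upper)

theorem pv_nested_fold {β : Type} (g : β → String → β) (mis : List (List (String × List String))) :
    ∀ init : β,
      mis.foldl (fun st m =>
          ((PySem.Dict.mk m).getD "yp_service_fit" []).foldl (fun st s => g st (PySem.Str.upper s)) st) init
        = (pvOccs mis).foldl g init := by
  induction mis with
  | nil => intro init; simp [pvOccs]
  | cons m t ih =>
    intro init
    simp only [List.foldl_cons, pvOccs, List.flatMap_cons, List.foldl_append, List.foldl_map] at *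
    exact ih _

theorem pv_foldl_add {α : Type} (f : α → Int) (xs : List α) :
    ∀ a : Int, xs.foldl (fun s x => s + f x) a = a + (xs.map f).sum := by
  induction xs with
  | nil => intro a; simp
  | cons x t ih => intro a; simp [ih]; ring

theorem pv_stepA (occ : List String) :
    ∀ (s0 : Int) (l0 : List String),
      occ.foldl (fun st k =>
          if SERVICE_WEIGHT.getD k 0 ≠ 0 then (st.1 + SERVICE_WEIGHT.getD k 0, st.2 ++ [k]) else st) (s0, l0)
        = (s0 + (occ.map (fun k => SERVICE_WEIGHT.getD k 0)).sum,
           l0 ++ occ.filter (fun k => SERVICE_WEIGHT.getD k 0 ≠ 0)) := by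
  induction occ with
  | nil => intro s0 l0; simp
  | cons k t ih =>
    intro s0 l0
    rw [List.foldl_cons]
    by_cases h : SERVICE_WEIGHT.getD k 0 = 0
    · rw [if_neg (fun hc => hc h), ih]
      simp [h]
    · rw [if_pos h, ih]
      simp [h, add_assoc]

theorem pv_sum_count (f : String → Int) (xs : List String) :
    ((PySem.List.dedup xs).map (fun k => f k * (xs.count k : Int))).sum = (xs.map f).sum := by
  have hnd : (PySem.List.dedup xs).Nodup := PySem.List.nodup_dedup xs
  have htf : (PySem.List.dedup xs).toFinset = xs.toFinset := by
    ext a; simp [List.mem_toFinset]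
  rw [Finset.sum_list_map_count, Finset.sum_list_map_count, htf]
  apply Finset.sum_congr rfl
  intro m hm
  have hm' : m ∈ PySem.List.dedup xs := by
    rw [PySem.List.mem_dedup]; simpa [List.mem_toFinset] using hm
  rw [List.count_eq_one_of_mem hnd hm']
  simp [mul_comm]

theorem pv_signals (p : String → Prop) [DecidablePred p] (xs : List String) :
    PySem.List.sorted ((PySem.Set.ofList xs).filter (fun k => p k)) (fun x => x) false
      = PySem.List.sorted (PySem.List.dedup (xs.filter (fun k => p k))) (fun x => x) false := by
  apply PySem.List.sorted_eq_sorted_of_perm _ _ _ (fun a b h => h)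
  refine (List.perm_ext_iff_of_nodup ((PySem.Set.nodup_ofList xs).filter _) (PySem.List.nodup_dedup _)).mpr ?_
  intro a
  simp [List.mem_filter, PySem.Set.mem_ofList]

-- ===== VERDICT (by name: the statement is the Claim_ definition above) =====
theorem score_service_fit_py_spec : Claim_equal_score_service_fit_py := by
  intro mis _
  unfold Spec_score_service_fit_py
  dsimp only [score_service_fit_py, score_service_fit_py_alt]
  rw [pv_nested_fold (fun st k =>
        if SERVICE_WEIGHT.getD k 0 ≠ 0 then (st.1 + SERVICE_WEIGHT.getD k 0, st.2 ++ [k]) else st)]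
  rw [pv_nested_fold (fun (d : PySem.Dict String Int) (k : String) => d.insert k (d.getD k 0 + 1))]
  rw [PySem.Dict.foldl_insert_getD_add_one_eq_counter]
  rw [pv_stepA]
  refine Prod.ext ?_ ?_
  · show (0 : Int) + _ = _
    rw [pv_foldl_add (fun kc : String × Int => SERVICE_WEIGHT.getD kc.1 0 * kc.2)]
    rw [PySem.Dict.items_counter]
    rw [List.map_map]
    rw [← PySem.List.dedup_eq_ofList]
    simp only [Function.comp_def]
    rw [pv_sum_count]
  · show PySem.List.sorted _ _ _ = PySem.List.sorted _ _ _
    rw [PySem.Dict.keys_counter]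
    exact (pv_signals (fun k => SERVICE_WEIGHT.getD k 0 ≠ 0) (pvOccs mis)).symm
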